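-- pv_equiv track=rewrite | github.com/Pchaewon/CodingTest-practice | 프로그래머스/lv0/120886. A로 B 만들기/A로 B 만들기.py | solution
-- ===== SOURCE A (Python) =====
-- def solution(before, after):
--     answer = 0
--     len_after = len(after)
--     for n in before:
--         if after.find(n) != -1:
--             answer += 1
--             after = after.replace(n,'',1)
--         else:
--             pass
--
--     if len_after==answer:
--         return 1
--     else:
--         return 0
-- ===== SOURCE B (Python) =====
-- def solution(before, after):
--     cnt = {}
--     for c in before:
--         cnt[c] = cnt.get(c, 0) + 1
--     for c in after:
--         k = cnt.get(c, 0)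
--         if k == 0:
--             return 0
--         cnt[c] = k - 1
--     return 1
-- ===== Notes on version B (the rewrite author's own statement) =====
-- stated objective: faster
-- what changed: Replaces A's per-character find/replace rescans of the shrinking 'after' string with a single character-count dictionary built from 'before' and decremented while scanning 'after' once.
import Mathlib
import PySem

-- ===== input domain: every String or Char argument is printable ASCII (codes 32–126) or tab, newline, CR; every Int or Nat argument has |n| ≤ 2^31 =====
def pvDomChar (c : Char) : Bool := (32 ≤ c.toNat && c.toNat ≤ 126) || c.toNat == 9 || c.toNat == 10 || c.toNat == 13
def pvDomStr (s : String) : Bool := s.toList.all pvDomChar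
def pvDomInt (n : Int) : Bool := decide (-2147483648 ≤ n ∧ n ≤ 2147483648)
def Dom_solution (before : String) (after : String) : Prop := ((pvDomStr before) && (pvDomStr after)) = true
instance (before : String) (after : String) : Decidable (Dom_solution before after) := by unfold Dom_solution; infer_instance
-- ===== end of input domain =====

-- B replaces A's per-character find/replace rescans with a count dictionary built once; return value only, no mutation.

-- ===== PORT A =====
-- hand port of after.replace(n, '', 1) for a single character n: delete the first occurrence
-- (exact: Python scans left to right and removes at most one match; no match leaves the string unchanged)
def pyReplaceOne (cs : List Char) (c : Char) : List Char :=
  match cs with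
  | [] => []
  | x :: xs => if x = c then xs else x :: pyReplaceOne xs c

def solution (before : String) (after : String) : Int :=
  let st := before.toList.foldl
    (fun (st : Int × List Char) n =>
      if PySem.Chars.find st.2 [n] ≠ -1 then (st.1 + 1, pyReplaceOne st.2 n) else st)
    (0, after.toList)
  if (PySem.Str.len after : Int) = st.1 then 1 else 0

-- ===== PORT B =====
def altGo (cnt : PySem.Dict Char Int) : List Char → Int
  | [] => 1
  | c :: rest =>
    let k := cnt.getD c 0
    if k = 0 then 0 else altGo (cnt.insert c (k - 1)) rest

def solution_alt (before : String) (after : String) : Int :=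
  let cnt := before.toList.foldl (fun d c => d.insert c (d.getD c 0 + 1)) PySem.Dict.empty
  altGo cnt after.toList

-- ===== PRECONDITION & SPEC =====
def Spec_solution (before : String) (after : String) (out : Int) : Prop := out = solution_alt before after
instance (before : String) (after : String) (out : Int) : Decidable (Spec_solution before after out) := by unfold Spec_solution; infer_instance

-- ===== CLAIM (what is proved, stated in full; the proofs are below) =====
def Claim_equal_solution : Prop := ∀ (before : String) (after : String), Dom_solution before after → Spec_solution before after (solution before after)

-- ===== LEMMAS AND PROOFS =====

theorem pyReplaceOne_eq_erase (cs : List Char) (c : Char) : pyReplaceOne cs c = cs.erase c := by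
  induction cs with
  | nil => rfl
  | cons x xs ih =>
    simp only [pyReplaceOne, List.erase_cons, ih]
    by_cases h : x = c <;> simp [h, beq_iff_eq]

-- A's loop body, named for the proofs
def aStep (st : Int × List Char) (n : Char) : Int × List Char :=
  if PySem.Chars.find st.2 [n] ≠ -1 then (st.1 + 1, pyReplaceOne st.2 n) else st

-- invariant: answer + |remaining after| is constant through A's loop
theorem aLoop_len (bs : List Char) (a0 : Int) (aft : List Char) :
    (bs.foldl aStep (a0, aft)).1 + ((bs.foldl aStep (a0, aft)).2.length : Int)
      = a0 + (aft.length : Int) := by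
  induction bs generalizing a0 aft with
  | nil => rfl
  | cons b bs ih =>
    simp only [List.foldl_cons, aStep]
    by_cases h : PySem.Chars.find aft [b] ≠ -1
    · have hmem : b ∈ aft := (List.singleton_infix_iff b aft).mp
        ((PySem.Chars.find_ne_neg_one_iff aft [b]).mp h)
      rw [if_pos h, pyReplaceOne_eq_erase, ih]
      rw [List.length_erase_of_mem hmem]
      have : 1 ≤ aft.length := List.length_pos_of_mem hmem
      omega
    · rw [if_neg h, ih]

-- per-character count of the remaining "after" string
theorem aLoop_count (bs : List Char) (a0 : Int) (aft : List Char) (c : Char) :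
    (bs.foldl aStep (a0, aft)).2.count c = aft.count c - bs.count c := by
  induction bs generalizing a0 aft with
  | nil => simp
  | cons b bs ih =>
    simp only [List.foldl_cons, aStep]
    by_cases h : PySem.Chars.find aft [b] ≠ -1
    · have hmem : b ∈ aft := (List.singleton_infix_iff b aft).mp
        ((PySem.Chars.find_ne_neg_one_iff aft [b]).mp h)
      rw [if_pos h, pyReplaceOne_eq_erase, ih]
      rw [List.count_erase, List.count_cons]
      by_cases hc : c = b <;> simp [hc, beq_iff_eq] <;> omega
    · have hmem : b ∉ aft := by
        intro hb
        exact h ((PySem.Chars.find_ne_neg_one_iff aft [b]).mpr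
          ((List.singleton_infix_iff b aft).mpr hb))
      rw [if_neg h, ih, List.count_cons]
      by_cases hc : c = b
      · subst hc
        have : aft.count c = 0 := List.count_eq_zero.mpr hmem
        simp [this]
      · have hbc : b ≠ c := fun e => hc e.symm
        simp [hbc]

-- characterization of A: returns 1 iff every character of after occurs at least as often in before
theorem solution_eq_one_iff (before after : String) :
    solution before after = (if ∀ c ∈ after.toList, after.toList.count c ≤ before.toList.count c then 1 else 0) := by
  unfold solution
  simp only [PySem.Str.len_eq]
  have hlen := aLoop_len before.toList 0 after.toList
  have hrem : (before.toList.foldl aStep (0, after.toList)).2 = []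
      ↔ ∀ c ∈ after.toList, after.toList.count c ≤ before.toList.count c := by
    rw [List.eq_nil_iff_forall_not_mem]
    constructor
    · intro hnil c hc
      have := aLoop_count before.toList 0 after.toList c
      have h0 : (before.toList.foldl aStep (0, after.toList)).2.count c = 0 :=
        List.count_eq_zero.mpr (hnil c)
      omega
    · intro hle c hc
      have hpos : 0 < (before.toList.foldl aStep (0, after.toList)).2.count c :=
        List.count_pos_iff.mpr hc
      have hcnt := aLoop_count before.toList 0 after.toList c
      by_cases hca : c ∈ after.toList
      · have := hle c hca; omega
      · have : after.toList.count c = 0 := List.count_eq_zero.mpr hca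
        omega
  have hsame : before.toList.foldl
      (fun (st : Int × List Char) n =>
        if PySem.Chars.find st.2 [n] ≠ -1 then (st.1 + 1, pyReplaceOne st.2 n) else st)
      (0, after.toList) = before.toList.foldl aStep (0, after.toList) := rfl
  rw [hsame]
  by_cases hall : ∀ c ∈ after.toList, after.toList.count c ≤ before.toList.count c
  · have hnil := hrem.mpr hall
    rw [if_pos hall]
    rw [hnil] at hlen
    simp only [List.length_nil] at hlen
    rw [if_pos (by omega)]
  · have hne : (before.toList.foldl aStep (0, after.toList)).2 ≠ [] := fun h => hall (hrem.mp h)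
    rw [if_neg hall, if_neg]
    have hlpos : 0 < (before.toList.foldl aStep (0, after.toList)).2.length :=
      List.length_pos_iff.mpr hne
    omega

-- characterization of B's scan: succeeds iff the dictionary covers every count, given nonnegative counts
theorem altGo_eq (d : PySem.Dict Char Int) (l : List Char)
    (hnn : ∀ c, 0 ≤ d.getD c 0) :
    altGo d l = (if ∀ c ∈ l, (l.count c : Int) ≤ d.getD c 0 then 1 else 0) := by
  induction l generalizing d with
  | nil => simp [altGo]
  | cons c rest ih =>
    simp only [altGo]
    by_cases hk : d.getD c 0 = 0
    · rw [if_pos hk, if_neg]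
      intro hall
      have h1 := hall c List.mem_cons_self
      rw [List.count_cons_self, hk] at h1
      have h2 : 0 ≤ (rest.count c : Int) := by exact_mod_cast Nat.zero_le _
      push_cast at h1
      omega
    · rw [if_neg hk]
      have hnn' : ∀ c', 0 ≤ (d.insert c (d.getD c 0 - 1)).getD c' 0 := by
        intro c'
        rw [PySem.Dict.getD_insert]
        split_ifs with h
        · have := hnn c; omega
        · exact hnn c'
      rw [ih _ hnn']
      have key : ∀ x, ((rest.count x : Int) ≤ (d.insert c (d.getD c 0 - 1)).getD x 0
          ↔ (((c :: rest).count x : Int)) ≤ d.getD x 0) := by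
        intro x
        rw [PySem.Dict.getD_insert]
        by_cases h : x = c
        · subst h
          rw [if_pos rfl, List.count_cons_self]
          push_cast
          omega
        · rw [if_neg h, List.count_cons]
          simp [Ne.symm h]
      congr 1
      apply propext
      constructor
      · intro hall x hx
        rcases List.mem_cons.mp hx with h1 | h1
        · subst h1
          by_cases hm : x ∈ rest
          · exact (key x).mp (hall x hm)
          · have h0 : rest.count x = 0 := List.count_eq_zero.mpr hm
            rw [List.count_cons_self, h0]
            have := hnn x
            push_cast
            omega
        · exact (key x).mp (hall x h1)
      · intro hall x hx
        exact (key x).mpr (hall x (List.mem_cons_of_mem c hx))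

theorem getD_empty_char (c : Char) : (PySem.Dict.empty : PySem.Dict Char Int).getD c 0 = 0 := rfl

theorem solution_alt_eq_one_iff (before after : String) :
    solution_alt before after = (if ∀ c ∈ after.toList, after.toList.count c ≤ before.toList.count c then 1 else 0) := by
  unfold solution_alt
  have hcnt : ∀ c, (before.toList.foldl (fun d c => d.insert c (d.getD c 0 + 1))
      (PySem.Dict.empty : PySem.Dict Char Int)).getD c 0 = (before.toList.count c : Int) := by
    intro c
    rw [PySem.Dict.getD_foldl_insert_add_one, getD_empty_char]
    simp
  have hnn : ∀ c, 0 ≤ (before.toList.foldl (fun d c => d.insert c (d.getD c 0 + 1))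
      (PySem.Dict.empty : PySem.Dict Char Int)).getD c 0 := by
    intro c; rw [hcnt]; exact_mod_cast Nat.zero_le _
  rw [altGo_eq _ _ hnn]
  congr 1
  apply propext
  constructor
  · intro h c hc
    have := h c hc
    rw [hcnt] at this
    exact_mod_cast this
  · intro h c hc
    rw [hcnt]
    exact_mod_cast h c hc

-- ===== VERDICT (by name: the statement is the Claim_ definition above) =====
theorem solution_spec : Claim_equal_solution := by
  intro before after _
  unfold Spec_solution
  rw [solution_eq_one_iff, solution_alt_eq_one_iff]
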